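-- pv_equiv track=rewrite | github.com/qdrant/demo-code-search | code_search/postprocessing.py | highlight_overlap
-- ===== SOURCE A (Python) =====
-- def highlight_overlap(text: str, start_line: int, from_line: int, to_line: int, start_tag="<mark>", end_tag="</mark>"):
--     """Highlight overlapping lines in the text using start_tag and end_tag
--
--     Args:
--         text:
--         start_line:
--         from_line:
--         to_line:
--         start_tag:
--         end_tag:
--
--     Returns: Highlighted text
--     """
--     lines = text.split("\n")
--     highlighted_lines = []
--     for i, line in enumerate(lines):
--         if i + start_line in range(from_line, to_line + 1):
--             highlighted_lines.append(f"{start_tag}{line}{end_tag}")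
--         else:
--             highlighted_lines.append(line)
--     return "\n".join(highlighted_lines)
-- ===== SOURCE B (Python) =====
-- def highlight_overlap(text: str, start_line: int, from_line: int, to_line: int, start_tag="<mark>", end_tag="</mark>"):
--     """Highlight overlapping lines by slicing out the affected window instead of testing every line."""
--     lines = text.split("\n")
--     lo = max(0, from_line - start_line)
--     hi = max(lo, to_line - start_line + 1)
--     return "\n".join(
--         lines[:lo]
--         + [f"{start_tag}{line}{end_tag}" for line in lines[lo:hi]]
--         + lines[hi:]
--     )
-- ===== Notes on version B (the rewrite author's own statement) =====
-- stated objective: alternative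
-- what changed: B computes the highlighted window bounds lo=max(0,from_line-start_line), hi=max(lo,to_line-start_line+1) once and rebuilds the result by slice concatenation (prefix + wrapped middle slice + suffix), instead of A's per-line enumerate loop testing membership of i+start_line in range(from_line,to_line+1).
import Mathlib
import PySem

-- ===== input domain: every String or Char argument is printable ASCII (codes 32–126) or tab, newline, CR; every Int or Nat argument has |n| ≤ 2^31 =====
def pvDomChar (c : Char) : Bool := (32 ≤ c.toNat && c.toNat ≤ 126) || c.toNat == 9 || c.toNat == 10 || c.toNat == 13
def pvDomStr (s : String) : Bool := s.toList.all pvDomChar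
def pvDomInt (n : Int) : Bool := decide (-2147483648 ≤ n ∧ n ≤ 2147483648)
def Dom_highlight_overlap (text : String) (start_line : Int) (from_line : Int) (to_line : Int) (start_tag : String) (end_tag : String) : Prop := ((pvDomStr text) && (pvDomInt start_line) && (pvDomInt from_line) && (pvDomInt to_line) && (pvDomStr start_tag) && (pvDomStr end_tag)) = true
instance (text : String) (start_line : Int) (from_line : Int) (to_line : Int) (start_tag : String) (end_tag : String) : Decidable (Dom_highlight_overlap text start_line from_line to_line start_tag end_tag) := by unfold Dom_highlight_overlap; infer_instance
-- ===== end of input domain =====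

-- B replaces A's per-line range-membership test by computing the clamped window [lo, hi)
-- once and rebuilding the result from three slices (alternative decomposition, same cost).


-- ===== PORT A =====
-- literal transliteration of A: enumerate the lines, test i+start_line ∈ range(from_line, to_line+1)
-- (i.e. from_line ≤ i+start_line < to_line+1), append the wrapped or plain line, join with "\n".
def highlight_overlap (text : String) (start_line : Int) (from_line : Int) (to_line : Int) (start_tag : String) (end_tag : String) : String :=
  let lines := (PySem.Str.split? text "\n").getD []   -- sep "\n" ≠ "", so split? is some
  let highlighted_lines := (PySem.List.enumerate lines 0).foldl
    (fun acc p =>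
      if from_line ≤ p.1 + start_line ∧ p.1 + start_line < to_line + 1 then
        acc ++ [start_tag ++ p.2 ++ end_tag]
      else
        acc ++ [p.2]) []
  PySem.Str.join "\n" highlighted_lines

-- ===== PORT B =====
-- literal transliteration of B: window bounds lo/hi, then prefix ++ wrapped middle slice ++ suffix.
def highlight_overlap_alt (text : String) (start_line : Int) (from_line : Int) (to_line : Int) (start_tag : String) (end_tag : String) : String :=
  let lines := (PySem.Str.split? text "\n").getD []   -- sep "\n" ≠ "", so split? is some
  let lo := max 0 (from_line - start_line)
  let hi := max lo (to_line - start_line + 1)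
  PySem.Str.join "\n"
    (PySem.List.slice lines none (some lo)
      ++ (PySem.List.slice lines (some lo) (some hi)).map (fun line => start_tag ++ line ++ end_tag)
      ++ PySem.List.slice lines (some hi) none)

-- ===== PRECONDITION & SPEC =====
def Spec_highlight_overlap (text : String) (start_line : Int) (from_line : Int) (to_line : Int) (start_tag : String) (end_tag : String) (out : String) : Prop := out = highlight_overlap_alt text start_line from_line to_line start_tag end_tag
instance (text : String) (start_line : Int) (from_line : Int) (to_line : Int) (start_tag : String) (end_tag : String) (out : String) : Decidable (Spec_highlight_overlap text start_line from_line to_line start_tag end_tag out) := by unfold Spec_highlight_overlap; infer_instance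

-- ===== CLAIM (what is proved, stated in full; the proofs are below) =====
def Claim_equal_highlight_overlap : Prop := ∀ (text : String) (start_line : Int) (from_line : Int) (to_line : Int) (start_tag : String) (end_tag : String), Dom_highlight_overlap text start_line from_line to_line start_tag end_tag → Spec_highlight_overlap text start_line from_line to_line start_tag end_tag (highlight_overlap text start_line from_line to_line start_tag end_tag)

-- ===== LEMMAS AND PROOFS =====

/-- Relative-index form of "wrap the lines whose index lies in [lo, hi)". -/
def wrapRange (g : String → String) : Int → Int → List String → List String
  | _, _, [] => []
  | lo, hi, x :: xs => (if lo ≤ 0 ∧ 0 < hi then g x else x) :: wrapRange g (lo-1) (hi-1) xs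

theorem wrapRange_congr (g : String → String) :
    ∀ (L : List String) (lo hi lo' hi' : Int),
      (∀ i : Int, 0 ≤ i → i < L.length → ((lo ≤ i ∧ i < hi) ↔ (lo' ≤ i ∧ i < hi'))) →
      wrapRange g lo hi L = wrapRange g lo' hi' L := by
  intro L
  induction L with
  | nil => intro _ _ _ _ _; rfl
  | cons x xs ih =>
    intro lo hi lo' hi' h
    have h0 := h 0 le_rfl (by exact_mod_cast Nat.succ_pos xs.length)
    simp only [wrapRange]
    congr 1
    · by_cases hc : lo ≤ 0 ∧ 0 < hi
      · rw [if_pos hc, if_pos (h0.mp hc)]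
      · rw [if_neg hc, if_neg (fun hc' => hc (h0.mpr hc'))]
    · refine ih _ _ _ _ (fun i hi0 hilen => ?_)
      have := h (i + 1) (by omega) (by simp only [List.length_cons]; push_cast at hilen ⊢; omega)
      omega

theorem foldl_wrap_eq_map (g : String → String) (C : Int × String → Prop) [DecidablePred C] :
    ∀ (xs : List (Int × String)) (acc : List String),
      xs.foldl (fun acc p => if C p then acc ++ [g p.2] else acc ++ [p.2]) acc
        = acc ++ xs.map (fun p => if C p then g p.2 else p.2) := by
  intro xs
  induction xs with
  | nil => simp
  | cons p xs ih =>
    intro acc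
    simp only [List.foldl_cons, List.map_cons]
    rw [ih]
    by_cases hc : C p
    · simp [hc]
    · simp [hc]

theorem enumerate_map_eq_wrapRange (g : String → String) (lo hi : Int) :
    ∀ (L : List String) (s : Int),
      (PySem.List.enumerate L s).map (fun p => if lo ≤ p.1 ∧ p.1 < hi then g p.2 else p.2)
        = wrapRange g (lo - s) (hi - s) L := by
  intro L
  induction L with
  | nil => intro s; simp [PySem.List.enumerate_nil, wrapRange]
  | cons x xs ih =>
    intro s
    rw [PySem.List.enumerate_cons]
    simp only [List.map_cons, wrapRange]
    congr 1
    · by_cases hc : lo ≤ s ∧ s < hi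
      · rw [if_pos hc, if_pos (by omega)]
      · rw [if_neg hc, if_neg (by omega)]
    · rw [ih (s + 1)]
      congr 1 <;> omega

theorem wrapRange_of_hi_nonpos (g : String → String) :
    ∀ (M : List String) (a b : Int), b ≤ 0 → wrapRange g a b M = M := by
  intro M
  induction M with
  | nil => intro a b _; rfl
  | cons y ys ihy =>
    intro a b hb
    simp only [wrapRange]
    rw [if_neg (by omega), ihy _ _ (by omega)]

theorem slices_eq_wrapRange (g : String → String) :
    ∀ (L : List String) (lo hi : Int), 0 ≤ lo → lo ≤ hi →
      L.take lo.toNat ++ ((L.drop lo.toNat).take (hi.toNat - lo.toNat)).map g ++ L.drop hi.toNat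
        = wrapRange g lo hi L := by
  intro L
  induction L with
  | nil => intro lo hi _ _; simp [wrapRange]
  | cons x xs ih =>
    intro lo hi h0 hlh
    by_cases hlo : lo = 0
    · subst hlo
      by_cases hhi : hi = 0
      · subst hhi
        simp only [Int.toNat_zero, List.take_zero, List.drop_zero, Nat.sub_zero,
          List.nil_append, List.map_nil, wrapRange]
        rw [if_neg (by omega), wrapRange_of_hi_nonpos g xs (0 - 1) (0 - 1) (by omega)]
      · have hnat : hi.toNat = (hi - 1).toNat + 1 := by omega
        simp only [Int.toNat_zero, List.take_zero, List.drop_zero, Nat.sub_zero,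
          List.nil_append, wrapRange]
        rw [if_pos (by omega), hnat, List.take_succ_cons, List.drop_succ_cons,
          List.map_cons, List.cons_append]
        congr 1
        rw [wrapRange_congr g xs (0 - 1) (hi - 1) 0 (hi - 1) (by intro i h1 h2; omega)]
        have := ih 0 (hi - 1) le_rfl (by omega)
        simpa using this
    · have hlon : lo.toNat = (lo - 1).toNat + 1 := by omega
      have hhin : hi.toNat = (hi - 1).toNat + 1 := by omega
      simp only [wrapRange]
      rw [if_neg (by omega), hlon, hhin, List.take_succ_cons, List.drop_succ_cons,
        List.drop_succ_cons, Nat.add_sub_add_right, List.cons_append, List.cons_append]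
      congr 1
      exact ih (lo - 1) (hi - 1) (by omega) (by omega)

/-- Core identity: A's enumerate-and-test loop equals B's three-slice decomposition,
    for an arbitrary list of lines. -/
theorem key_lists (st fr tl : Int) (s e : String) (L : List String) :
    (PySem.List.enumerate L 0).foldl
        (fun acc p =>
          if fr ≤ p.1 + st ∧ p.1 + st < tl + 1 then acc ++ [s ++ p.2 ++ e] else acc ++ [p.2]) []
      = PySem.List.slice L none (some (max 0 (fr - st)))
        ++ (PySem.List.slice L (some (max 0 (fr - st)))
              (some (max (max 0 (fr - st)) (tl - st + 1)))).map (fun line => s ++ line ++ e)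
        ++ PySem.List.slice L (some (max (max 0 (fr - st)) (tl - st + 1))) none := by
  set g : String → String := fun line => s ++ line ++ e with hg
  set lo := max 0 (fr - st) with hlo
  set hi := max lo (tl - st + 1) with hhi
  have hlo0 : 0 ≤ lo := by omega
  have hhi0 : 0 ≤ hi := by omega
  have hlh : lo ≤ hi := by omega
  rw [foldl_wrap_eq_map g (fun p => fr ≤ p.1 + st ∧ p.1 + st < tl + 1) (PySem.List.enumerate L 0) [],
    List.nil_append]
  have hA : (PySem.List.enumerate L 0).map
      (fun p => if fr ≤ p.1 + st ∧ p.1 + st < tl + 1 then g p.2 else p.2)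
      = wrapRange g (fr - st) (tl + 1 - st) L := by
    have h2 := enumerate_map_eq_wrapRange g (fr - st) (tl + 1 - st) L 0
    simp only [sub_zero] at h2
    rw [← h2]
    apply List.map_congr_left
    intro p _
    by_cases hc : fr - st ≤ p.1 ∧ p.1 < tl + 1 - st
    · rw [if_pos (by omega), if_pos hc]
    · rw [if_neg (by omega), if_neg hc]
  rw [hA, PySem.List.slice_to L hlo0, PySem.List.slice_toNat L hlo0 hhi0,
    PySem.List.slice_from L hhi0, slices_eq_wrapRange g L lo hi hlo0 hlh]
  exact wrapRange_congr g L _ _ _ _ (by intro i h1 h2; omega)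

-- ===== VERDICT (by name: the statement is the Claim_ definition above) =====
theorem highlight_overlap_spec : Claim_equal_highlight_overlap := by
  intro text start_line from_line to_line start_tag end_tag _
  unfold Spec_highlight_overlap highlight_overlap highlight_overlap_alt
  exact congrArg (PySem.Str.join "\n")
    (key_lists start_line from_line to_line start_tag end_tag
      ((PySem.Str.split? text "\n").getD []))
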